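-- pv_equiv track=rewrite | github.com/teyter/bioinfo | debruijn/teitlib.py | bagmax
-- ===== SOURCE A (Python) =====
-- def bagmax(tli):
--     ret = []
--     currentMax = 0
--     for i in range(len(tli)):
--         nr = tli[i][0]
--         item = tli[i][1]
--         allt = tli[i] # debug, sja nr og item
--         if nr > currentMax:
--             currentMax = nr
--             ret.clear()
--             ret.append(item)
--         elif nr == currentMax:
--             ret.append(item)
--     return ret
-- ===== SOURCE B (Python) =====
-- def bagmax(tli):
--     m = max([0, *(t[0] for t in tli)])
--     return [t[1] for t in tli if t[0] == m]
-- ===== Notes on version B (the rewrite author's own statement) =====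
-- stated objective: simpler
-- what changed: Replaces the single accumulating pass with mutable running-max state and list clearing by a two-pass compute-then-filter: take the max count (seeded with 0, mirroring A's initial floor) and keep the items tied for it.
import Mathlib
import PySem

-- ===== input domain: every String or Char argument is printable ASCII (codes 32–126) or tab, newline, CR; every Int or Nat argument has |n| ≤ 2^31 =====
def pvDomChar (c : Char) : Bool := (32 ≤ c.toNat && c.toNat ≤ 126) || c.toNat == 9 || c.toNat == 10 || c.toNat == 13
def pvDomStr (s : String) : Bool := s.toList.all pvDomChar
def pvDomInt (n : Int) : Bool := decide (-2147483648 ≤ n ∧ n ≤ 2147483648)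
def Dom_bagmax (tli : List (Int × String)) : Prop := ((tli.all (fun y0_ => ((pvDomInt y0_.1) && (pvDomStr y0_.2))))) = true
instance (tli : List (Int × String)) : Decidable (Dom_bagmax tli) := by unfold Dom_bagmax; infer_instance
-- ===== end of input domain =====

-- B replaces A's single accumulating pass (running max + clear/append) with a two-pass
-- compute-max-then-filter decomposition; objective: simpler.


-- ===== PORT A =====
-- one loop step: state (currentMax, ret); 'ret.clear(); ret.append(item)' becomes [item]
def bagmaxStep (st : Int × List String) (t : Int × String) : Int × List String :=
  if t.1 > st.1 then (t.1, [t.2])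
  else if t.1 = st.1 then (st.1, st.2 ++ [t.2])
  else st

def bagmax (tli : List (Int × String)) : List String :=
  (tli.foldl bagmaxStep (0, [])).2

-- ===== PORT B =====
def bagmax_alt (tli : List (Int × String)) : List String :=
  let m := tli.foldl (fun a t => max a t.1) 0
  (tli.filter (fun t => t.1 = m)).map Prod.snd

-- ===== PRECONDITION & SPEC =====
def Spec_bagmax (tli : List (Int × String)) (out : List String) : Prop := out = bagmax_alt tli
instance (tli : List (Int × String)) (out : List String) : Decidable (Spec_bagmax tli out) := by unfold Spec_bagmax; infer_instance

-- ===== CLAIM (what is proved, stated in full; the proofs are below) =====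
def Claim_equal_bagmax : Prop := ∀ (tli : List (Int × String)), Dom_bagmax tli → Spec_bagmax tli (bagmax tli)

-- ===== LEMMAS AND PROOFS =====

theorem foldl_max_ge (l : List (Int × String)) (cm : Int) :
    cm ≤ l.foldl (fun a t => max a t.1) cm := by
  induction l generalizing cm with
  | nil => simp
  | cons h t ih => exact le_trans (le_max_left _ _) (ih (max cm h.1))

-- invariant: A's fold from state (cm, ret) yields the global max m and
-- (old ret if m = cm else []) ++ the items of l tied for m
theorem bagmax_fold_char (l : List (Int × String)) (cm : Int) (ret : List String) :
    l.foldl bagmaxStep (cm, ret)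
      = (l.foldl (fun a t => max a t.1) cm,
         (if l.foldl (fun a t => max a t.1) cm = cm then ret else [])
           ++ (l.filter (fun t => t.1 = l.foldl (fun a t => max a t.1) cm)).map Prod.snd) := by
  induction l generalizing cm ret with
  | nil => simp
  | cons h t ih =>
    have hge : max cm h.1 ≤ t.foldl (fun a t => max a t.1) (max cm h.1) :=
      foldl_max_ge t (max cm h.1)
    by_cases hgt : h.1 > cm
    · have hmax : max cm h.1 = h.1 := max_eq_right (le_of_lt hgt)
      have hge' : h.1 ≤ t.foldl (fun a t => max a t.1) h.1 := foldl_max_ge t h.1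
      have hne : t.foldl (fun a t => max a t.1) h.1 ≠ cm := by intro he; omega
      simp only [List.foldl_cons, bagmaxStep, if_pos hgt, ih, List.filter_cons, hmax]
      by_cases heq : t.foldl (fun a t => max a t.1) h.1 = h.1
      · simp only [heq]
        have hcm : h.1 ≠ cm := by omega
        simp [hcm]
      · have h1 : ¬ (h.1 = t.foldl (fun a t => max a t.1) h.1) := fun he => heq he.symm
        simp [heq, hne, h1]
    · by_cases heqc : h.1 = cm
      · have hmax : max cm h.1 = cm := by omega
        simp only [List.foldl_cons, bagmaxStep, if_neg hgt, if_pos heqc, ih, hmax,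
          List.filter_cons]
        by_cases heq : t.foldl (fun a t => max a t.1) cm = cm
        · have : h.1 = t.foldl (fun a t => max a t.1) cm := by omega
          simp [heq, this]
        · have : ¬ (h.1 = t.foldl (fun a t => max a t.1) cm) := by
            intro he; exact heq (by omega)
          simp [heq, this]
      · have hmax : max cm h.1 = cm := by omega
        have hlt : h.1 ≠ t.foldl (fun a t => max a t.1) cm := by
          intro he; rw [hmax] at hge; omega
        simp only [List.foldl_cons, bagmaxStep, if_neg hgt, if_neg heqc, ih, hmax,
          List.filter_cons]
        simp [hlt]

-- ===== VERDICT (by name: the statement is the Claim_ definition above) =====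
theorem bagmax_spec : Claim_equal_bagmax := by
  intro tli _
  unfold Spec_bagmax bagmax bagmax_alt
  rw [bagmax_fold_char]
  by_cases h : tli.foldl (fun a t => max a t.1) 0 = 0 <;> simp [h]
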